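-- pv_equiv track=rewrite | github.com/LucasHasting/Text-File-Organization-Project | main.py | get2
-- ===== SOURCE A (Python) =====
-- def get2(a, ar, search):
--   blank = []
--   blank.append([])
--   second = 0
--   for i in (range(len(search))):
--     line = search[i]
--     if a in line:
--       ar.append(line)
--       blank.append([])
--       second += 1
--     blank[second].append(line)
--   return blank
-- ===== SOURCE B (Python) =====
-- def get2(a, ar, search):
--     positions = [i for i, line in enumerate(search) if a in line]
--     ar.extend(search[i] for i in positions)
--     if not positions:
--         return [search[:]]
--     blank = [search[:positions[0]]]
--     blank.extend(search[i:j] for i, j in zip(positions, positions[1:]))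
--     blank.append(search[positions[-1]:])
--     return blank
-- ===== Notes on version B (the rewrite author's own statement) =====
-- stated objective: alternative
-- what changed: A builds the groups incrementally in one indexed loop (appending each line to the current group and opening a new group at each match); B first collects the match positions with enumerate and then constructs the groups by slicing `search` at those positions.
import Mathlib
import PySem

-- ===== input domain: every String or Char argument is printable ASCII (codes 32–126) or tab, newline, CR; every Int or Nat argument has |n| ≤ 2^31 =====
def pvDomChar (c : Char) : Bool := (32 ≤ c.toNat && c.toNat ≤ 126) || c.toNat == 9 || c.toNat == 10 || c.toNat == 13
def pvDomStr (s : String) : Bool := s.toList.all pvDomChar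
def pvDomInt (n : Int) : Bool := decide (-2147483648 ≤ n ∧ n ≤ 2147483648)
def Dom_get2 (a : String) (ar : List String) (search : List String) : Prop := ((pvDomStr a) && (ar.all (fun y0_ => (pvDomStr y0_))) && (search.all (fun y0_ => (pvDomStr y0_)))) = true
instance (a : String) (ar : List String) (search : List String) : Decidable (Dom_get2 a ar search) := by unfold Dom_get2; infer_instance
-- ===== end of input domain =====

-- B replaces A's incremental one-group-at-a-time loop by an index-then-slice strategy
-- (collect match positions, then cut `search` at those positions); objective: alternative
-- decomposition, same asymptotic cost. Both A and B mutate `ar` in place in Python (A appends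
-- the matching lines one by one, B extends with exactly those lines in the same order); the
-- equivalence proved here is about the RETURN value only.

-- ===== PORT A =====
-- loop body of A; `second` is a Python int that starts at 0 and is only incremented, so Nat is exact
def get2Step (a : String) (st : List (List String) × Nat) (line : String) : List (List String) × Nat :=
  let s1 := if PySem.Str.isIn a line then (st.1 ++ [([] : List String)], st.2 + 1) else st
  (s1.1.set s1.2 ((s1.1.getD s1.2 []) ++ [line]), s1.2)

def get2 (a : String) (ar : List String) (search : List String) : List (List String) :=
  ((PySem.List.pyRange 0 (PySem.List.len search) 1).foldl
      (fun st i => get2Step a st (PySem.List.pyGetD search i ""))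
      ([[]], 0)).1

-- ===== PORT B =====
-- positions = [i for i, line in enumerate(search) if a in line]
def altPositions (a : String) (search : List String) : List Int :=
  (PySem.List.enumerate search 0).filterMap (fun p => if PySem.Str.isIn a p.2 then some p.1 else none)

-- the slices search[i:j] for consecutive position pairs, plus the final search[p_last:]
def altChunks (search : List String) : List Int → List (List String)
  | [] => []
  | [p] => [PySem.List.slice search (some p) none]
  | p :: q :: rest => PySem.List.slice search (some p) (some q) :: altChunks search (q :: rest)

def get2_alt (a : String) (ar : List String) (search : List String) : List (List String) :=
  match altPositions a search with
  | [] => [search]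
  | p :: rest => PySem.List.slice search none (some p) :: altChunks search (p :: rest)

-- ===== PRECONDITION & SPEC =====
def Spec_get2 (a : String) (ar : List String) (search : List String) (out : List (List String)) : Prop := out = get2_alt a ar search
instance (a : String) (ar : List String) (search : List String) (out : List (List String)) : Decidable (Spec_get2 a ar search out) := by unfold Spec_get2; infer_instance

-- ===== CLAIM (what is proved, stated in full; the proofs are below) =====
def Claim_equal_get2 : Prop := ∀ (a : String) (ar : List String) (search : List String), Dom_get2 a ar search → Spec_get2 a ar search (get2 a ar search)

-- ===== LEMMAS AND PROOFS =====

-- reference grouping, computed right-to-left: (current head group, completed later groups)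
def pvFS (a : String) : List String → List String × List (List String)
  | [] => ([], [])
  | x :: xs =>
    let p := pvFS a xs
    if PySem.Str.isIn a x then ([], (x :: p.1) :: p.2) else (x :: p.1, p.2)

-- Nat-valued match positions
def pvNP (a : String) : List String → List Nat
  | [] => []
  | x :: xs => (if PySem.Str.isIn a x then [0] else []) ++ (pvNP a xs).map (· + 1)

-- Nat-level version of altChunks
def pvChunksN (l : List String) : List Nat → List (List String)
  | [] => []
  | [p] => [l.drop p]
  | p :: q :: rest => (l.drop p).take (q - p) :: pvChunksN l (q :: rest)

-- altPositions with a general enumerate start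
def pvPosF (a : String) (xs : List String) (s : Int) : List Int :=
  (PySem.List.enumerate xs s).filterMap (fun p => if PySem.Str.isIn a p.2 then some p.1 else none)

theorem pvPosF_shift (a : String) (xs : List String) : ∀ s : Int, pvPosF a xs s = (pvPosF a xs 0).map (s + ·) := by
  induction xs with
  | nil => intro s; simp [pvPosF, PySem.List.enumerate_nil]
  | cons x xs ih =>
    intro s
    simp only [pvPosF, PySem.List.enumerate_cons, List.filterMap_cons]
    have h1 : (PySem.List.enumerate xs (s + 1)).filterMap (fun p => if PySem.Str.isIn a p.2 then some p.1 else none) = (pvPosF a xs 0).map ((s + 1) + ·) := ih (s + 1)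
    have h0 : (PySem.List.enumerate xs (0 + 1)).filterMap (fun p => if PySem.Str.isIn a p.2 then some p.1 else none) = (pvPosF a xs 0).map ((0 + 1) + ·) := ih (0 + 1)
    simp only [PySem.Str.isIn] at h1 h0 ⊢
    by_cases hm : PySem.Chars.isIn a.toList x.toList = true
    · simp only [hm, if_pos]
      rw [h1, h0]
      simp only [List.map_map, List.map_cons]
      refine congrArg₂ _ (by ring) (List.map_congr_left (fun k _ => by simp; ring))
    · simp only [hm, if_neg, Bool.false_eq_true, not_false_iff]
      rw [h1, h0]
      simp only [List.map_map]
      exact List.map_congr_left (fun k _ => by simp; ring)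

theorem pvPosF_cons (a x : String) (xs : List String) :
    pvPosF a (x :: xs) 0 = (if PySem.Chars.isIn a.toList x.toList then [(0 : Int)] else []) ++ (pvPosF a xs 0).map (fun k => 1 + k) := by
  have h := pvPosF_shift a xs 1
  simp only [pvPosF, PySem.List.enumerate_cons, List.filterMap_cons, PySem.Str.isIn] at h ⊢
  by_cases hm : PySem.Chars.isIn a.toList x.toList = true
  · simp [hm, h]
  · simp [hm, h]

theorem pvPosF_nat (a : String) (xs : List String) : pvPosF a xs 0 = (pvNP a xs).map (fun k : Nat => (k : Int)) := by
  induction xs with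
  | nil => simp [pvPosF, pvNP, PySem.List.enumerate_nil]
  | cons x xs ih =>
    rw [pvPosF_cons, ih]
    by_cases hm : PySem.Chars.isIn a.toList x.toList = true
    · simp [pvNP, PySem.Str.isIn, hm]
      intro k _
      ring
    · simp [pvNP, PySem.Str.isIn, hm]
      intro k _
      ring

theorem altChunks_cast (l : List String) (ps : List Nat) :
    altChunks l (ps.map (fun k : Nat => (k : Int))) = pvChunksN l ps := by
  induction ps with
  | nil => simp [altChunks, pvChunksN]
  | cons p ps ih =>
    cases ps with
    | nil => simp [altChunks, pvChunksN, PySem.List.slice_from_natCast]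
    | cons q rest =>
      simp only [List.map_cons] at ih ⊢
      simp [altChunks, pvChunksN, PySem.List.slice_natCast, ih]

theorem get2_alt_eq_nat (a : String) (ar : List String) (search : List String) :
    get2_alt a ar search =
      (match pvNP a search with
       | [] => [search]
       | p :: rest => search.take p :: pvChunksN search (p :: rest)) := by
  have hp : altPositions a search = (pvNP a search).map (fun k : Nat => (k : Int)) := pvPosF_nat a search
  unfold get2_alt
  rw [hp]
  cases h : pvNP a search with
  | nil => simp
  | cons p rest =>
    simp only [List.map_cons]
    rw [PySem.List.slice_to_natCast]
    rw [← List.map_cons, altChunks_cast]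

theorem pvChunksN_shift (l : List String) (x : String) (p : Nat) (ps : List Nat) :
    pvChunksN (x :: l) ((p :: ps).map (· + 1)) = pvChunksN l (p :: ps) := by
  induction ps generalizing p with
  | nil => simp [pvChunksN]
  | cons q rest ih =>
    simp only [List.map_cons] at ih ⊢
    simp [pvChunksN, ih, Nat.add_sub_add_right]

theorem natAlt_eq_fS (a : String) (search : List String) :
    (match pvNP a search with
     | [] => [search]
     | p :: rest => search.take p :: pvChunksN search (p :: rest)) =
    (pvFS a search).1 :: (pvFS a search).2 := by
  induction search with
  | nil => simp [pvNP, pvFS]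
  | cons x xs ih =>
    cases h : pvNP a xs with
    | nil =>
      rw [h] at ih
      obtain ⟨h1, h2⟩ : xs = (pvFS a xs).1 ∧ ([] : List (List String)) = (pvFS a xs).2 := by
        simpa using ih
      by_cases hm : PySem.Chars.isIn a.toList x.toList = true
      · simp [pvNP, pvFS, PySem.Str.isIn, hm, h, pvChunksN, ← h1, ← h2]
      · simp [pvNP, pvFS, PySem.Str.isIn, hm, h, ← h1, ← h2]
    | cons p rest =>
      rw [h] at ih
      obtain ⟨h1, h2⟩ : xs.take p = (pvFS a xs).1 ∧ pvChunksN xs (p :: rest) = (pvFS a xs).2 := by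
        simpa using ih
      by_cases hm : PySem.Chars.isIn a.toList x.toList = true
      · simp only [pvNP, PySem.Str.isIn, hm, if_pos, h, List.map_cons, List.cons_append,
          List.nil_append]
        show ([] : List String) :: pvChunksN (x :: xs) (0 :: (p + 1) :: rest.map (· + 1)) = _
        have hc : pvChunksN (x :: xs) (0 :: (p + 1) :: rest.map (· + 1)) =
            ((x :: xs).drop 0).take (p + 1 - 0) :: pvChunksN (x :: xs) ((p :: rest).map (· + 1)) := rfl
        rw [hc, pvChunksN_shift, h2]
        simp [pvFS, PySem.Str.isIn, hm, ← h1, ← h2]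
      · simp only [pvNP, PySem.Str.isIn, hm, Bool.false_eq_true, if_false, h, List.map_cons,
          List.nil_append]
        show (x :: xs).take (p + 1) :: pvChunksN (x :: xs) ((p :: rest).map (· + 1)) = _
        rw [pvChunksN_shift, h2]
        simp [pvFS, PySem.Str.isIn, hm, ← h1, ← h2]

-- (l ++ [g]).set l.length v = l ++ [v], and getD there is g
theorem pv_getD_concat {α : Type} (l : List α) (g d : α) : (l ++ [g]).getD l.length d = g := by
  simp [List.getD_eq_getElem?_getD]

theorem pv_set_concat {α : Type} (l : List α) (g v : α) : (l ++ [g]).set l.length v = l ++ [v] := by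
  induction l with
  | nil => simp
  | cons x xs ih => simp [ih]

theorem foldA (a : String) (ys : List String) : ∀ (blank : List (List String)) (g : List String),
    ys.foldl (get2Step a) (blank ++ [g], blank.length) =
      (blank ++ ((g ++ (pvFS a ys).1) :: (pvFS a ys).2), blank.length + (pvFS a ys).2.length) := by
  induction ys with
  | nil => intro blank g; simp [pvFS]
  | cons y ys ih =>
    intro blank g
    by_cases hm : PySem.Str.isIn a y = true
    · have hmc : PySem.Chars.isIn a.toList y.toList = true := by
        simpa [PySem.Str.isIn] using hm
      have hstep : get2Step a (blank ++ [g], blank.length) y =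
          ((blank ++ [g]) ++ [[y]], (blank ++ [g]).length) := by
        simp only [get2Step, PySem.Str.isIn, hmc, if_pos]
        rw [show blank.length + 1 = (blank ++ [g]).length by simp]
        rw [show blank ++ [g] ++ [([] : List String)] = (blank ++ [g]) ++ [([] : List String)] from by
          simp]
        rw [pv_getD_concat, pv_set_concat]
        simp
      have hfs : pvFS a (y :: ys) = ([], (y :: (pvFS a ys).1) :: (pvFS a ys).2) := by
        simp only [pvFS, PySem.Str.isIn, hmc, if_pos]
      rw [List.foldl_cons, hstep, ih, hfs]
      refine Prod.ext ?_ ?_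
      · simp
      · simp
        omega
    · have hmc : PySem.Chars.isIn a.toList y.toList = false := by
        simpa [PySem.Str.isIn] using hm
      have hstep : get2Step a (blank ++ [g], blank.length) y =
          (blank ++ [g ++ [y]], blank.length) := by
        simp only [get2Step, PySem.Str.isIn, hmc, Bool.false_eq_true, if_false]
        rw [pv_getD_concat, pv_set_concat]
      have hfs : pvFS a (y :: ys) = (y :: (pvFS a ys).1, (pvFS a ys).2) := by
        simp only [pvFS, PySem.Str.isIn, hmc, Bool.false_eq_true, if_false]
      rw [List.foldl_cons, hstep, ih, hfs]
      simp

theorem get2_eq_fS (a : String) (ar : List String) (search : List String) :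
    get2 a ar search = (pvFS a search).1 :: (pvFS a search).2 := by
  unfold get2
  rw [PySem.List.foldl_pyRange_zero_pyGetD search "" (get2Step a) ([[]], 0)]
  have h := foldA a search [] []
  simp only [List.nil_append, List.length_nil] at h
  rw [h]

-- ===== VERDICT (by name: the statement is the Claim_ definition above) =====
theorem get2_spec : Claim_equal_get2 := by
  intro a ar search _
  show get2 a ar search = get2_alt a ar search
  rw [get2_eq_fS, get2_alt_eq_nat, natAlt_eq_fS]
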